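-- pv_equiv track=rewrite | github.com/Vigneswar-A/vigneswar-a.github.io | programming/leetcode/759.py | intersectionSizeTwo
-- ===== SOURCE A (Python) =====
-- from typing import List
--
-- def intersectionSizeTwo(intervals: List[List[int]]) -> int:
--
--     n = len(intervals)
--     intervals.sort(key=lambda arr:(arr[-1], arr[0]))
--
--     required = {i:2 for i in range(n)}
--     nums = []
--     for i in range(n):
--         if required[i] == 2:
--             nums.append(intervals[i][-1])
--             nums.append(intervals[i][-1]-1)
--             required[i] = 0
--             for j in range(i+1, n):
--                 if intervals[j][0] <= intervals[i][-1] <= intervals[j][-1]: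
--                     required[j] -= 1
--                 if intervals[j][0] <= intervals[i][-1]-1 <= intervals[j][-1]:
--                     required[j] -= 1
--         elif required[i]== 1:
--             if intervals[i][-1] not in nums:
--                 nums.append(intervals[i][-1])
--             else:
--                 nums.append(intervals[i][-1]-1)
--             required[i] = 0
--             for j in range(i+1, n):
--                 if intervals[j][0] <= nums[-1] <= intervals[j][-1]:
--                     required[j] -= 1
--
--     return len(nums)
-- ===== SOURCE B (Python) =====
-- def intersectionSizeTwo(intervals):
--     # Greedy one-pass: sort by (end, start); keep only the two largest chosen
--     # points (with multiplicity) and a running count, instead of A's O(n^2)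
--     # re-scan of all later intervals with a 'required' dict.
--     count, pair = 0, None  # pair = (second-largest, largest) chosen point
--     for iv in sorted(intervals, key=lambda a: (a[-1], a[0])):
--         s, e = iv[0], iv[-1]
--         if pair is None or pair[1] < s:
--             count += 2
--             pair = ((e - 1) if pair is None else max(pair[1], e - 1), e)
--         elif pair[0] < s:
--             count += 1
--             pair = (e - 1, e) if pair[1] == e else (pair[1], e)
--     return count
-- ===== Notes on version B (the rewrite author's own statement) =====
-- stated objective: faster
-- what changed: A simulates the choice with a list of chosen points and a 'required' dict that it re-updates by scanning all later intervals after every choice; B is a one-pass greedy over the same (end, start)-sorted order that keeps only a running count and the two largest chosen points.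
import Mathlib
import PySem

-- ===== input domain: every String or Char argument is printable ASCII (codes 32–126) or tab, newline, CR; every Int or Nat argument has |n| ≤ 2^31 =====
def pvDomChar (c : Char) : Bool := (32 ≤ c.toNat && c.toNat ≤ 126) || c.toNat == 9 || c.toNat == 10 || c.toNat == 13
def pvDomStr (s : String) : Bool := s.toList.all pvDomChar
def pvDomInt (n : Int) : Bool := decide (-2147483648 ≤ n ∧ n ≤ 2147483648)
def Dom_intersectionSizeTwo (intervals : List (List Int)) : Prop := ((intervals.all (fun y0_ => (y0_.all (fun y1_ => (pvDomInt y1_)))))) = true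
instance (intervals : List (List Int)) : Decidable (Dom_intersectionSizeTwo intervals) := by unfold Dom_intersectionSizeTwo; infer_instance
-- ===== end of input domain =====

-- B replaces A's quadratic bookkeeping (a 'required' dict re-updated for all later intervals)
-- by a one-pass greedy over the same sorted order keeping only the two largest chosen points;
-- A sorts its argument in place (B does not): the equivalence proved here is about the return value.

-- ===== PORT A =====
-- arr[-1] / arr[0] of interval number i; pyGetD is exact for nonempty arr (Pre_ excludes inputs
-- with an empty inner list, on which Python's sort key arr[-1] raises IndexError).
def pvEndA (ivs : List (List Int)) (i : Int) : Int :=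
  PySem.List.pyGetD (PySem.List.pyGetD ivs i []) (-1) 0

def pvStartA (ivs : List (List Int)) (i : Int) : Int :=
  PySem.List.pyGetD (PySem.List.pyGetD ivs i []) 0 0

-- body of A's inner 'for j in range(i+1, n)' loop in the required[i] == 2 branch:
-- the two 'required[j] -= 1' statements (keys 0..n-1 always present, so the
-- read is getD j 0 and 'required[j] -= 1' is insert j (getD j 0 - 1), overwrite in place)
def pvInnerStep2 (ivs : List (List Int)) (i : Int) (r : PySem.Dict Int Int) (j : Int) :
    PySem.Dict Int Int :=
  let r := if pvStartA ivs j ≤ pvEndA ivs i ∧ pvEndA ivs i ≤ pvEndA ivs j then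
    r.insert j (r.getD j 0 - 1) else r
  if pvStartA ivs j ≤ pvEndA ivs i - 1 ∧ pvEndA ivs i - 1 ≤ pvEndA ivs j then
    r.insert j (r.getD j 0 - 1) else r

-- body of the inner loop in the required[i] == 1 branch (nums is the already-extended list,
-- so nums[-1] is the point just appended)
def pvInnerStep1 (ivs : List (List Int)) (nums : List Int) (r : PySem.Dict Int Int) (j : Int) :
    PySem.Dict Int Int :=
  if pvStartA ivs j ≤ PySem.List.pyGetD nums (-1) 0 ∧
      PySem.List.pyGetD nums (-1) 0 ≤ pvEndA ivs j then
    r.insert j (r.getD j 0 - 1) else r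

-- body of A's outer 'for i in range(n)' loop; state = (required, nums)
def pvStepA (ivs : List (List Int)) (n : Int) (st : PySem.Dict Int Int × List Int) (i : Int) :
    PySem.Dict Int Int × List Int :=
  let required := st.1
  let nums := st.2
  if required.getD i 0 = 2 then
    let nums := nums ++ [pvEndA ivs i]
    let nums := nums ++ [pvEndA ivs i - 1]
    let required := required.insert i 0
    let required := (PySem.List.pyRange (i + 1) n 1).foldl (pvInnerStep2 ivs i) required
    (required, nums)
  else if required.getD i 0 = 1 then
    let nums := if pvEndA ivs i ∉ nums then nums ++ [pvEndA ivs i] else nums ++ [pvEndA ivs i - 1]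
    let required := required.insert i 0
    let required := (PySem.List.pyRange (i + 1) n 1).foldl (pvInnerStep1 ivs nums) required
    (required, nums)
  else st

def intersectionSizeTwo (intervals : List (List Int)) : Int :=
  let n : Int := intervals.length
  let ivs := PySem.List.sorted2 intervals
    (fun arr => PySem.List.pyGetD arr (-1) 0) (fun arr => PySem.List.pyGetD arr 0 0)
  let required : PySem.Dict Int Int :=
    (PySem.List.pyRange 0 n 1).foldl (fun d i => d.insert i 2) PySem.Dict.empty
  let st := (PySem.List.pyRange 0 n 1).foldl (pvStepA ivs n) (required, [])
  (st.2.length : Int)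

-- ===== PORT B =====
-- body of B's loop; state = (count, pair), pair = (second-largest, largest) chosen point or None
def pvStepB (st : Int × Option (Int × Int)) (iv : List Int) : Int × Option (Int × Int) :=
  let s := PySem.List.pyGetD iv 0 0
  let e := PySem.List.pyGetD iv (-1) 0
  match st.2 with
  | none => (st.1 + 2, some (e - 1, e))
  | some (p1, p2) =>
    if p2 < s then (st.1 + 2, some (max p2 (e - 1), e))
    else if p1 < s then (st.1 + 1, some (if p2 = e then (e - 1, e) else (p2, e)))
    else st

def intersectionSizeTwo_alt (intervals : List (List Int)) : Int :=
  let st := (PySem.List.sorted2 intervals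
    (fun arr => PySem.List.pyGetD arr (-1) 0) (fun arr => PySem.List.pyGetD arr 0 0)).foldl
      pvStepB (0, none)
  st.1

-- ===== PRECONDITION & SPEC =====
-- Pre_ excludes exactly the inputs containing an empty inner list, on which A's sort key
-- arr[-1] raises IndexError (B raises there too).
def Pre_intersectionSizeTwo (intervals : List (List Int)) : Prop :=
  ∀ l ∈ intervals, l ≠ []
instance (intervals : List (List Int)) : Decidable (Pre_intersectionSizeTwo intervals) := by
  unfold Pre_intersectionSizeTwo; infer_instance

def pvWitness_intersectionSizeTwo : List (List Int) := [[1, 3], [0, 2], [2, 6]]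

def Spec_intersectionSizeTwo (intervals : List (List Int)) (out : Int) : Prop :=
  out = intersectionSizeTwo_alt intervals
instance (intervals : List (List Int)) (out : Int) : Decidable (Spec_intersectionSizeTwo intervals out) := by
  unfold Spec_intersectionSizeTwo; infer_instance

-- ===== CLAIM (what is proved, stated in full; the proofs are below) =====
def Claim_equal_intersectionSizeTwo : Prop :=
  ∀ (intervals : List (List Int)), Dom_intersectionSizeTwo intervals →
    Pre_intersectionSizeTwo intervals →
      Spec_intersectionSizeTwo intervals (intersectionSizeTwo intervals)

-- ===== LEMMAS AND PROOFS =====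

-- number of chosen points (with multiplicity) lying inside the interval [s, e]
def pvCnt (nums : List Int) (s e : Int) : Nat :=
  nums.countP (fun x => decide (s ≤ x ∧ x ≤ e))

-- A's loop characterised on (start, end) pairs: required[i] always equals 2 - pvCnt nums s e,
-- so A's branches depend only on that count (proved in pvOuterA)
def pvSimA : List (Int × Int) → List Int → List Int
  | [], nums => nums
  | (s, e) :: rest, nums =>
    if pvCnt nums s e = 0 then pvSimA rest (nums ++ [e, e - 1])
    else if pvCnt nums s e = 1 then
      pvSimA rest (nums ++ [if e ∈ nums then e - 1 else e])
    else pvSimA rest nums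

-- B's loop body on extracted (start, end) pairs
def pvStepP (st : Int × Option (Int × Int)) (p : Int × Int) : Int × Option (Int × Int) :=
  match st.2 with
  | none => (st.1 + 2, some (p.2 - 1, p.2))
  | some (p1, p2) =>
    if p2 < p.1 then (st.1 + 2, some (max p2 (p.2 - 1), p.2))
    else if p1 < p.1 then (st.1 + 1, some (if p2 = p.2 then (p.2 - 1, p.2) else (p2, p.2)))
    else st

-- getD after a dict-fold whose step touches only its own key
theorem pvDict_getD_foldl (l : List Int) (u : Int → Int → Int)
    (step : PySem.Dict Int Int → Int → PySem.Dict Int Int)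
    (hne : ∀ r j k, k ≠ j → (step r j).getD k 0 = r.getD k 0)
    (heq : ∀ r j, (step r j).getD j 0 = u j (r.getD j 0))
    (k : Int) (r : PySem.Dict Int Int) (hk : l.count k ≤ 1) :
    (l.foldl step r).getD k 0 = if k ∈ l then u k (r.getD k 0) else r.getD k 0 := by
  induction l generalizing r with
  | nil => simp
  | cons x t ih =>
    by_cases hx : k = x
    · subst hx
      have hkt : k ∉ t := by
        simp at hk
        intro hmem
        have := List.count_pos_iff.mpr hmem
        omega
      simp only [List.foldl_cons]
      rw [ih (step r k) (by rw [List.count_eq_zero.mpr hkt]; omega)]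
      simp [hkt, heq]
    · simp only [List.foldl_cons]
      rw [ih (step r x) (by simp [List.count_cons] at hk; omega)]
      simp [hne r x k hx, hx, List.mem_cons]

theorem pvInner_two (ivs : List (List Int)) (a n i : Int) (required : PySem.Dict Int Int)
    (j : Int) (hj : a ≤ j ∧ j < n) :
    ((PySem.List.pyRange a n 1).foldl (pvInnerStep2 ivs i) required).getD j 0
    = required.getD j 0
        - (if pvStartA ivs j ≤ pvEndA ivs i ∧ pvEndA ivs i ≤ pvEndA ivs j then 1 else 0)
        - (if pvStartA ivs j ≤ pvEndA ivs i - 1 ∧ pvEndA ivs i - 1 ≤ pvEndA ivs j then 1 else 0) := by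
  rw [pvDict_getD_foldl _
    (fun j v => v - (if pvStartA ivs j ≤ pvEndA ivs i ∧ pvEndA ivs i ≤ pvEndA ivs j then 1 else 0)
        - (if pvStartA ivs j ≤ pvEndA ivs i - 1 ∧ pvEndA ivs i - 1 ≤ pvEndA ivs j then 1 else 0)) _
    ?_ ?_ _ _ ((List.nodup_iff_count_le_one).mp (PySem.List.nodup_pyRange_one _ _) j)]
  · rw [if_pos (PySem.List.mem_pyRange_one.mpr (by omega))]
  · intro r j' k hk
    simp only [pvInnerStep2]
    split_ifs <;> simp [PySem.Dict.getD_insert_of_ne _ _ _ hk]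
  · intro r j'
    simp only [pvInnerStep2]
    split_ifs <;> simp [PySem.Dict.getD_insert_self]

theorem pvInner_one (ivs : List (List Int)) (a n : Int) (nums : List Int)
    (required : PySem.Dict Int Int) (j : Int) (hj : a ≤ j ∧ j < n) :
    ((PySem.List.pyRange a n 1).foldl (pvInnerStep1 ivs nums) required).getD j 0
    = required.getD j 0 - (if pvStartA ivs j ≤ PySem.List.pyGetD nums (-1) 0 ∧
        PySem.List.pyGetD nums (-1) 0 ≤ pvEndA ivs j then 1 else 0) := by
  rw [pvDict_getD_foldl _
    (fun j w => w - (if pvStartA ivs j ≤ PySem.List.pyGetD nums (-1) 0 ∧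
        PySem.List.pyGetD nums (-1) 0 ≤ pvEndA ivs j then 1 else 0)) _
    ?_ ?_ _ _ ((List.nodup_iff_count_le_one).mp (PySem.List.nodup_pyRange_one _ _) j)]
  · rw [if_pos (PySem.List.mem_pyRange_one.mpr (by omega))]
  · intro r j' k hk
    simp only [pvInnerStep1]
    split_ifs <;> simp [PySem.Dict.getD_insert_of_ne _ _ _ hk]
  · intro r j'
    simp only [pvInnerStep1]
    split_ifs <;> simp [PySem.Dict.getD_insert_self]

-- A's outer loop with the dict invariant: required[j] = 2 - (points already inside interval j)
theorem pvOuterA (ivs : List (List Int)) (fuel : Nat) : ∀ (k : Nat),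
    ivs.length - k ≤ fuel → ∀ (required : PySem.Dict Int Int) (nums : List Int),
    (∀ j : Nat, k ≤ j → j < ivs.length →
      required.getD (j : Int) 0 = 2 - (pvCnt nums (pvStartA ivs j) (pvEndA ivs j) : Int)) →
    ((PySem.List.pyRange (k : Int) (ivs.length : Int) 1).foldl
        (pvStepA ivs (ivs.length : Int)) (required, nums)).2
      = pvSimA ((ivs.drop k).map
          (fun l => (PySem.List.pyGetD l 0 0, PySem.List.pyGetD l (-1) 0))) nums := by
  induction fuel with
  | zero =>
    intro k hf required nums hinv
    have hk : ivs.length ≤ k := by omega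
    rw [PySem.List.pyRange_one_eq_nil (by exact_mod_cast hk)]
    rw [List.drop_of_length_le hk]
    rfl
  | succ m ih =>
    intro k hf required nums hinv
    by_cases hk : k < ivs.length
    · -- peel index k
      have hcons : PySem.List.pyRange (k : Int) (ivs.length : Int) 1
          = (k : Int) :: PySem.List.pyRange ((k : Int) + 1) (ivs.length : Int) 1 :=
        PySem.List.pyRange_one_cons (by exact_mod_cast hk)
      have hcast : ((k : Int) + 1) = ((k + 1 : Nat) : Int) := by push_cast; ring
      have hgetiv : PySem.List.pyGetD ivs (k : Int) [] = ivs[k] := by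
        rw [PySem.List.pyGetD_natCast, List.getD_eq_getElem?_getD, List.getElem?_eq_getElem hk]
        rfl
      have hdropk : ivs.drop k = ivs[k] :: ivs.drop (k + 1) := List.drop_eq_getElem_cons hk
      have hs : pvStartA ivs (k : Int) = PySem.List.pyGetD ivs[k] 0 0 := by
        rw [pvStartA, hgetiv]
      have he : pvEndA ivs (k : Int) = PySem.List.pyGetD ivs[k] (-1) 0 := by
        rw [pvEndA, hgetiv]
      set s := pvStartA ivs (k : Int) with hs_def
      set e := pvEndA ivs (k : Int) with he_def
      have hgd : required.getD (k : Int) 0 = 2 - (pvCnt nums s e : Int) := hinv k le_rfl hk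
      have hrhs : pvSimA ((ivs.drop k).map
            (fun l => (PySem.List.pyGetD l 0 0, PySem.List.pyGetD l (-1) 0))) nums
          = pvSimA ((s, e) :: (ivs.drop (k + 1)).map
            (fun l => (PySem.List.pyGetD l 0 0, PySem.List.pyGetD l (-1) 0))) nums := by
        rw [hdropk]; rw [List.map_cons, hs, he]
      rw [hcons, List.foldl_cons, hrhs]
      by_cases hc0 : pvCnt nums s e = 0
      · -- required[k] == 2 : A appends e and e-1
        have hcond : required.getD (k : Int) 0 = 2 := by rw [hgd, hc0]; simp
        rw [show pvStepA ivs (ivs.length : Int) (required, nums) (k : Int)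
            = ((PySem.List.pyRange ((k : Int) + 1) (ivs.length : Int) 1).foldl
                (pvInnerStep2 ivs (k : Int)) (required.insert (k : Int) 0),
               nums ++ [e] ++ [e - 1]) by
          simp only [pvStepA, hcond, ← he_def]
          simp]
        rw [show pvSimA ((s, e) :: (ivs.drop (k + 1)).map
              (fun l => (PySem.List.pyGetD l 0 0, PySem.List.pyGetD l (-1) 0))) nums
            = pvSimA ((ivs.drop (k + 1)).map
              (fun l => (PySem.List.pyGetD l 0 0, PySem.List.pyGetD l (-1) 0)))
              (nums ++ [e, e - 1]) by simp [pvSimA, hc0]]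
        rw [hcast]
        rw [show nums ++ [e] ++ [e - 1] = nums ++ [e, e - 1] by simp]
        apply ih (k + 1) (by omega)
        intro j hj1 hj2
        rw [pvInner_two ivs _ _ _ _ _ ⟨by exact_mod_cast hj1, by exact_mod_cast hj2⟩]
        rw [← he_def]
        rw [PySem.Dict.getD_insert_of_ne _ _ _ (by
          intro h
          have : j = k := by exact_mod_cast h
          omega)]
        rw [hinv j (by omega) hj2]
        have hcnt' : pvCnt (nums ++ [e, e - 1]) (pvStartA ivs j) (pvEndA ivs j)
            = pvCnt nums (pvStartA ivs j) (pvEndA ivs j)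
              + (if pvStartA ivs (j : Int) ≤ e ∧ e ≤ pvEndA ivs (j : Int) then 1 else 0)
              + (if pvStartA ivs (j : Int) ≤ e - 1 ∧ e - 1 ≤ pvEndA ivs (j : Int) then 1 else 0) := by
          unfold pvCnt
          simp [List.countP_append, List.countP_cons]
          split_ifs <;> omega
        rw [hcnt']
        push_cast
        split_ifs <;> ring
      · by_cases hc1 : pvCnt nums s e = 1
        · -- required[k] == 1 : A appends one point
          have hcond2 : ¬ required.getD (k : Int) 0 = 2 := by rw [hgd, hc1]; omega
          have hcond1 : required.getD (k : Int) 0 = 1 := by rw [hgd, hc1]; simp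
          have hstep : pvStepA ivs (ivs.length : Int) (required, nums) (k : Int)
              = ((PySem.List.pyRange ((k : Int) + 1) (ivs.length : Int) 1).foldl
                  (pvInnerStep1 ivs (if e ∉ nums then nums ++ [e] else nums ++ [e - 1]))
                  (required.insert (k : Int) 0),
                 if e ∉ nums then nums ++ [e] else nums ++ [e - 1]) := by
            simp only [pvStepA, hcond1, ← he_def]
            simp
          rw [hstep]
          have hnums' : (if e ∉ nums then nums ++ [e] else nums ++ [e - 1])
              = nums ++ [if e ∈ nums then e - 1 else e] := by
            by_cases hmem : e ∈ nums <;> simp [hmem]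
          have hlast : PySem.List.pyGetD (nums ++ [if e ∈ nums then e - 1 else e]) (-1) 0
              = (if e ∈ nums then e - 1 else e) :=
            PySem.List.pyGetD_neg_one_append_singleton _ _ _
          rw [show pvSimA ((s, e) :: (ivs.drop (k + 1)).map
                (fun l => (PySem.List.pyGetD l 0 0, PySem.List.pyGetD l (-1) 0))) nums
              = pvSimA ((ivs.drop (k + 1)).map
                (fun l => (PySem.List.pyGetD l 0 0, PySem.List.pyGetD l (-1) 0)))
                (nums ++ [if e ∈ nums then e - 1 else e]) by simp [pvSimA, hc1]]
          rw [hcast, hnums']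
          apply ih (k + 1) (by omega)
          intro j hj1 hj2
          rw [pvInner_one ivs _ _ _ _ _ ⟨by exact_mod_cast hj1, by exact_mod_cast hj2⟩]
          rw [hlast]
          rw [PySem.Dict.getD_insert_of_ne _ _ _ (by
            intro h
            have : j = k := by exact_mod_cast h
            omega)]
          rw [hinv j (by omega) hj2]
          have hcnt' : pvCnt (nums ++ [if e ∈ nums then e - 1 else e]) (pvStartA ivs j) (pvEndA ivs j)
              = pvCnt nums (pvStartA ivs j) (pvEndA ivs j)
                + (if pvStartA ivs (j : Int) ≤ (if e ∈ nums then e - 1 else e) ∧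
                    (if e ∈ nums then e - 1 else e) ≤ pvEndA ivs (j : Int) then 1 else 0) := by
            unfold pvCnt
            simp [List.countP_append, List.countP_cons]
          rw [hcnt']
          push_cast
          split_ifs <;> ring
        · -- required[k] ≤ 0 : A skips
          have hcond2 : ¬ required.getD (k : Int) 0 = 2 := by rw [hgd]; omega
          have hcond1 : ¬ required.getD (k : Int) 0 = 1 := by rw [hgd]; omega
          rw [show pvStepA ivs (ivs.length : Int) (required, nums) (k : Int)
              = (required, nums) by simp only [pvStepA, hcond2, hcond1]; simp]
          rw [show pvSimA ((s, e) :: (ivs.drop (k + 1)).map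
                (fun l => (PySem.List.pyGetD l 0 0, PySem.List.pyGetD l (-1) 0))) nums
              = pvSimA ((ivs.drop (k + 1)).map
                (fun l => (PySem.List.pyGetD l 0 0, PySem.List.pyGetD l (-1) 0))) nums by
            simp [pvSimA, hc0, hc1]]
          rw [hcast]
          apply ih (k + 1) (by omega)
          intro j hj1 hj2
          exact hinv j (by omega) hj2
    · have hk' : ivs.length ≤ k := by omega
      rw [PySem.List.pyRange_one_eq_nil (by exact_mod_cast hk')]
      rw [List.drop_of_length_le hk']
      rfl

-- insertion keeps a transitively-closed order invariant
theorem pvPairwise_insertBy {α : Type} (before : α → α → Bool) (R : α → α → Prop)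
    (htrans : ∀ a b c, R a b → R b c → R a c)
    (hT : ∀ a b, before a b = true → R a b)
    (hF : ∀ a b, before a b = false → R b a)
    (x : α) (l : List α) (h : l.Pairwise R) :
    (PySem.List.insertBy before x l).Pairwise R := by
  induction l with
  | nil => simp [PySem.List.insertBy]
  | cons y ys ih =>
    rw [List.pairwise_cons] at h
    obtain ⟨hy, hys⟩ := h
    by_cases hb : before x y = true
    · rw [show PySem.List.insertBy before x (y :: ys) = x :: y :: ys by
        simp [PySem.List.insertBy, hb]]
      refine List.Pairwise.cons ?_ (List.Pairwise.cons hy hys)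
      intro z hz
      rcases List.mem_cons.mp hz with rfl | hz
      · exact hT _ _ hb
      · exact htrans _ _ _ (hT _ _ hb) (hy z hz)
    · rw [show PySem.List.insertBy before x (y :: ys) = y :: PySem.List.insertBy before x ys by
        simp [PySem.List.insertBy, hb]]
      refine List.Pairwise.cons ?_ (ih hys)
      intro z hz
      rcases (PySem.List.mem_insertBy before x z ys).mp hz with rfl | hz
      · exact hF _ _ (by simpa using hb)
      · exact hy z hz

theorem pvFoldl_insertBy_pairwise {α : Type} (before : α → α → Bool) (R : α → α → Prop)
    (htrans : ∀ a b c, R a b → R b c → R a c)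
    (hT : ∀ a b, before a b = true → R a b)
    (hF : ∀ a b, before a b = false → R b a)
    (xs : List α) (acc : List α) (hacc : acc.Pairwise R) :
    (xs.foldl (fun acc x => PySem.List.insertBy before x acc) acc).Pairwise R := by
  induction xs generalizing acc with
  | nil => simpa
  | cons x t ih => exact ih _ (pvPairwise_insertBy before R htrans hT hF x acc hacc)

-- the sorted list is nondecreasing in the primary key arr[-1]
theorem pvSorted2_pairwise (xs : List (List Int)) :
    (PySem.List.sorted2 xs (fun a => PySem.List.pyGetD a (-1) 0)
        (fun a => PySem.List.pyGetD a 0 0)).Pairwise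
      (fun a b => PySem.List.pyGetD a (-1) 0 ≤ PySem.List.pyGetD b (-1) 0) := by
  have hdef : PySem.List.sorted2 xs (fun a => PySem.List.pyGetD a (-1) 0)
      (fun a => PySem.List.pyGetD a 0 0)
    = xs.foldl (fun acc x => PySem.List.insertBy
        (fun a b : List Int =>
          decide (PySem.List.pyGetD a (-1) 0 < PySem.List.pyGetD b (-1) 0) ||
            (!decide (PySem.List.pyGetD b (-1) 0 < PySem.List.pyGetD a (-1) 0) &&
              decide (PySem.List.pyGetD a 0 0 < PySem.List.pyGetD b 0 0))) x acc) [] := rfl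
  rw [hdef]
  apply pvFoldl_insertBy_pairwise
  · intro a b c h1 h2; omega
  · intro a b hb
    simp only [Bool.or_eq_true, Bool.and_eq_true, Bool.not_eq_eq_eq_not, Bool.not_true,
      decide_eq_true_eq, decide_eq_false_iff_not] at hb
    rcases hb with h | ⟨h, _⟩ <;> omega
  · intro a b hb
    simp only [Bool.or_eq_false_iff, Bool.and_eq_false_iff, Bool.not_eq_eq_eq_not, Bool.not_false,
      decide_eq_true_eq, decide_eq_false_iff_not] at hb
    omega
  · exact List.Pairwise.nil

-- the abstraction: B's (count, two-largest-points) state tracks the length of A's nums list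
theorem pvAbsMain (ps : List (Int × Int)) (nums : List Int) (count : Int)
    (pair : Option (Int × Int))
    (hpw : ps.Pairwise (fun a b => a.2 ≤ b.2))
    (hb : ∀ x ∈ nums, ∀ p ∈ ps, x ≤ p.2)
    (hc : count = nums.length)
    (hrel : match pair with
      | none => nums = []
      | some (p1, p2) => p1 ≤ p2 ∧ ∃ rest, nums.Perm (p2 :: p1 :: rest) ∧ ∀ x ∈ rest, x ≤ p1) :
    (ps.foldl pvStepP (count, pair)).1 = ((pvSimA ps nums).length : Int) := by
  induction ps generalizing nums count pair with
  | nil => simpa [pvSimA]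
  | cons hd t ih =>
    obtain ⟨s, e⟩ := hd
    rw [List.pairwise_cons] at hpw
    obtain ⟨hhead, hpwt⟩ := hpw
    have hble : ∀ x ∈ nums, x ≤ e := fun x hx => hb x hx (s, e) (List.mem_cons_self)
    have hbt : ∀ x ∈ nums, ∀ p ∈ t, x ≤ p.2 := fun x hx p hp => hb x hx p (List.mem_cons_of_mem _ hp)
    have het : ∀ p ∈ t, e ≤ p.2 := fun p hp => hhead p hp
    cases pair with
    | none =>
      have hnil : nums = [] := hrel
      subst hnil
      have hcnt : pvCnt [] s e = 0 := by simp [pvCnt]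
      rw [List.foldl_cons]
      rw [show pvStepP (count, none) (s, e) = (count + 2, some (e - 1, e)) from rfl]
      rw [show pvSimA ((s, e) :: t) [] = pvSimA t ([] ++ [e, e - 1]) by simp [pvSimA, hcnt]]
      apply ih _ _ _ hpwt
      · intro x hx p hp
        simp only [List.nil_append, List.mem_cons] at hx
        rcases hx with rfl | rfl | h
        · exact het p hp
        · have := het p hp; omega
        · simp at h
      · simp at hc ⊢; omega
      · exact ⟨by omega, [], List.Perm.refl _, by simp⟩
    | some pr =>
      obtain ⟨p1, p2⟩ := pr
      obtain ⟨hple, rest, hperm, hrest⟩ := hrel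
      have hp2mem : p2 ∈ nums := hperm.mem_iff.mpr (by simp)
      have hp1mem : p1 ∈ nums := hperm.mem_iff.mpr (by simp)
      have hp2e : p2 ≤ e := hble _ hp2mem
      have hp1e : p1 ≤ e := hble _ hp1mem
      have hcnt_eq : pvCnt nums s e
          = pvCnt rest s e + (if s ≤ p1 ∧ p1 ≤ e then 1 else 0) + (if s ≤ p2 ∧ p2 ≤ e then 1 else 0) := by
        unfold pvCnt
        rw [hperm.countP_eq]
        simp [List.countP_cons]
      by_cases hs2 : p2 < s
      · -- no chosen point reaches s : A picks two new points
        have hcnt : pvCnt nums s e = 0 := by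
          rw [hcnt_eq]
          have h1 : ¬ (s ≤ p1 ∧ p1 ≤ e) := by omega
          have h2 : ¬ (s ≤ p2 ∧ p2 ≤ e) := by omega
          have h3 : pvCnt rest s e = 0 := by
            unfold pvCnt
            rw [List.countP_eq_zero]
            intro a ha
            have := hrest a ha
            simp; omega
          simp [h1, h2, h3]
        rw [List.foldl_cons]
        rw [show pvStepP (count, some (p1, p2)) (s, e)
            = (count + 2, some (max p2 (e - 1), e)) by simp [pvStepP, hs2]]
        rw [show pvSimA ((s, e) :: t) nums = pvSimA t (nums ++ [e, e - 1]) by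
          simp [pvSimA, hcnt]]
        apply ih _ _ _ hpwt
        · intro x hx p hp
          rcases List.mem_append.mp hx with h | h
          · exact hbt x h p hp
          · have := het p hp
            simp only [List.mem_cons] at h
            rcases h with rfl | rfl | h
            · omega
            · omega
            · simp at h
        · simp at hc ⊢; omega
        · refine ⟨by omega, min p2 (e - 1) :: p1 :: rest, ?_, ?_⟩
          · have step1 : (nums ++ [e, e - 1]).Perm ((p2 :: p1 :: rest) ++ [e, e - 1]) :=
              hperm.append_right _
            have step2 : ((p2 :: p1 :: rest) ++ [e, e - 1]).Perm
                (e :: (e - 1) :: p2 :: p1 :: rest) := List.perm_append_comm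
            refine step1.trans (step2.trans ?_)
            rcases le_or_gt p2 (e - 1) with hle | hgt
            · rw [max_eq_right hle, min_eq_left hle]
            · rw [max_eq_left (by omega), min_eq_right (by omega)]
              exact List.Perm.cons _ (List.Perm.swap p2 (e - 1) (p1 :: rest))
          · intro x hx
            simp only [List.mem_cons] at hx
            rcases hx with rfl | rfl | h
            · omega
            · omega
            · have := hrest x h; omega
      · by_cases hs1 : p1 < s
        · -- exactly one chosen point in [s, e] : A picks one fresh point
          have hcnt : pvCnt nums s e = 1 := by
            rw [hcnt_eq]
            have h1 : ¬ (s ≤ p1 ∧ p1 ≤ e) := by omega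
            have h2 : s ≤ p2 ∧ p2 ≤ e := by omega
            have h3 : pvCnt rest s e = 0 := by
              unfold pvCnt
              rw [List.countP_eq_zero]
              intro a ha
              have := hrest a ha
              simp; omega
            simp [h1, h2, h3]
          have hememb : e ∈ nums ↔ p2 = e := by
            constructor
            · intro h
              have := hperm.mem_iff.mp h
              simp only [List.mem_cons] at this
              rcases this with h' | h' | h'
              · omega
              · omega
              · have := hrest e h'; omega
            · intro h; rw [← h]; exact hp2mem
          have hp1lt : p1 ≤ e - 1 := by omega
          rw [List.foldl_cons]
          rw [show pvStepP (count, some (p1, p2)) (s, e)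
              = (count + 1, some (if p2 = e then (e - 1, e) else (p2, e))) by
            simp [pvStepP, hs2, hs1]]
          rw [show pvSimA ((s, e) :: t) nums
              = pvSimA t (nums ++ [if e ∈ nums then e - 1 else e]) by
            simp [pvSimA, hcnt]]
          by_cases hpe : p2 = e
          · rw [if_pos hpe, if_pos (hememb.mpr hpe)]
            apply ih _ _ _ hpwt
            · intro x hx p hp
              rcases List.mem_append.mp hx with h | h
              · exact hbt x h p hp
              · have := het p hp
                simp only [List.mem_singleton] at h
                omega
            · simp at hc ⊢; omega
            · refine ⟨by omega, p1 :: rest, ?_, ?_⟩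
              · have step1 : (nums ++ [e - 1]).Perm ((p2 :: p1 :: rest) ++ [e - 1]) :=
                  hperm.append_right _
                have step2 : ((p2 :: p1 :: rest) ++ [e - 1]).Perm
                    ((e - 1) :: p2 :: p1 :: rest) := List.perm_append_comm
                refine step1.trans (step2.trans ?_)
                rw [hpe]
                exact List.Perm.swap e (e - 1) (p1 :: rest)
              · intro x hx
                simp only [List.mem_cons] at hx
                rcases hx with rfl | h
                · omega
                · have := hrest x h; omega
          · rw [if_neg hpe, if_neg (fun h => hpe (hememb.mp h))]
            apply ih _ _ _ hpwt
            · intro x hx p hp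
              rcases List.mem_append.mp hx with h | h
              · exact hbt x h p hp
              · have := het p hp
                simp only [List.mem_singleton] at h
                omega
            · simp at hc ⊢; omega
            · refine ⟨hp2e, p1 :: rest, ?_, ?_⟩
              · have step1 : (nums ++ [e]).Perm ((p2 :: p1 :: rest) ++ [e]) :=
                  hperm.append_right _
                have step2 : ((p2 :: p1 :: rest) ++ [e]).Perm
                    (e :: p2 :: p1 :: rest) := List.perm_append_comm
                exact step1.trans step2
              · intro x hx
                simp only [List.mem_cons] at hx
                rcases hx with rfl | h
                · omega
                · have := hrest x h; omega
        · -- two chosen points already in [s, e] : both sides skip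
          have hcnt : 2 ≤ pvCnt nums s e := by
            rw [hcnt_eq]
            have h1 : s ≤ p1 ∧ p1 ≤ e := by omega
            have h2 : s ≤ p2 ∧ p2 ≤ e := by omega
            simp [h1, h2]
          rw [List.foldl_cons]
          rw [show pvStepP (count, some (p1, p2)) (s, e) = (count, some (p1, p2)) by
            simp [pvStepP, hs2, hs1]]
          rw [show pvSimA ((s, e) :: t) nums = pvSimA t nums by
            have h0 : ¬ pvCnt nums s e = 0 := by omega
            have h1 : ¬ pvCnt nums s e = 1 := by omega
            simp [pvSimA, h0, h1]]
          exact ih _ _ _ hpwt hbt hc ⟨hple, rest, hperm, hrest⟩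

-- ===== VERDICT (by name: the statement is the Claim_ definition above) =====
theorem intersectionSizeTwo_spec : Claim_equal_intersectionSizeTwo := by
  unfold Claim_equal_intersectionSizeTwo
  intro intervals _ _
  unfold Spec_intersectionSizeTwo intersectionSizeTwo intersectionSizeTwo_alt
  set ivs := PySem.List.sorted2 intervals
    (fun arr => PySem.List.pyGetD arr (-1) 0) (fun arr => PySem.List.pyGetD arr 0 0) with hivs
  have hlen : (intervals.length : Int) = (ivs.length : Int) := by
    rw [hivs, (PySem.List.sorted2_perm intervals _ _ false).length_eq]
  simp only [hlen]
  -- A's initial dict: every required[j] is 2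
  have hinit : ∀ j : Nat, 0 ≤ j → j < ivs.length →
      ((PySem.List.pyRange 0 (ivs.length : Int) 1).foldl
        (fun d i => d.insert i 2) PySem.Dict.empty).getD (j : Int) 0
      = 2 - (pvCnt [] (pvStartA ivs j) (pvEndA ivs j) : Int) := by
    intro j _ hj
    rw [pvDict_getD_foldl _ (fun _ _ => 2) _
      (fun r i k hk => PySem.Dict.getD_insert_of_ne _ _ _ hk)
      (fun r i => PySem.Dict.getD_insert_self _ _ _ _) _ _
      ((List.nodup_iff_count_le_one).mp (PySem.List.nodup_pyRange_one _ _) _)]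
    rw [if_pos (PySem.List.mem_pyRange_one.mpr (by omega))]
    simp [pvCnt]
  have hA := pvOuterA ivs ivs.length 0 (by omega) _ [] hinit
  rw [show ((0 : Nat) : Int) = (0 : Int) by simp, List.drop_zero] at hA
  rw [hA]
  -- B's fold over the sorted lists is the fold of pvStepP over the (start, end) pairs
  have hB : (ivs.foldl pvStepB ((0 : Int), (none : Option (Int × Int))))
      = ((ivs.map (fun l => (PySem.List.pyGetD l 0 0, PySem.List.pyGetD l (-1) 0))).foldl
          pvStepP ((0 : Int), (none : Option (Int × Int)))) := by
    rw [List.foldl_map]; rfl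
  rw [hB]
  rw [pvAbsMain _ [] 0 none ?_ (by simp) (by simp) rfl]
  exact List.pairwise_map.mpr (pvSorted2_pairwise intervals)
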